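-- pv_equiv track=rewrite | github.com/DidierTrosset-Acqiris/Waveforms | filter/FindEdge.py | FindPrevNext
-- ===== SOURCE A (Python) =====
-- def FindPrevNext( samples, level ):
--     belowLevel = False
--     for index, sample in enumerate( samples ):
--         if belowLevel:
--             if sample>=level:
--                 return ( (index-1, samples[index-1]), (index, samples[index]) )
--         else:
--             if sample<=level:
--                 belowLevel = True
--     raise RuntimeError( "No edge found" )
-- ===== SOURCE B (Python) =====
-- def FindPrevNext(samples, level):
--     # Precompute the running-minimum table, then pick the first index j whose
--     # sample is >= level while the prefix minimum before j is <= level.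
--     mins = []
--     for s in samples:
--         mins.append(s if not mins else min(mins[-1], s))
--     for j in range(1, len(samples)):
--         if samples[j] >= level and mins[j - 1] <= level:
--             return ((j - 1, samples[j - 1]), (j, samples[j]))
--     raise RuntimeError("No edge found")
-- ===== Notes on version B (the rewrite author's own statement) =====
-- stated objective: alternative
-- what changed: Replaces A's flag-carrying state machine by precomputing a running-minimum table in one pass and then directly returning the first index j with samples[j] >= level and mins[j-1] <= level.
import Mathlib
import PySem

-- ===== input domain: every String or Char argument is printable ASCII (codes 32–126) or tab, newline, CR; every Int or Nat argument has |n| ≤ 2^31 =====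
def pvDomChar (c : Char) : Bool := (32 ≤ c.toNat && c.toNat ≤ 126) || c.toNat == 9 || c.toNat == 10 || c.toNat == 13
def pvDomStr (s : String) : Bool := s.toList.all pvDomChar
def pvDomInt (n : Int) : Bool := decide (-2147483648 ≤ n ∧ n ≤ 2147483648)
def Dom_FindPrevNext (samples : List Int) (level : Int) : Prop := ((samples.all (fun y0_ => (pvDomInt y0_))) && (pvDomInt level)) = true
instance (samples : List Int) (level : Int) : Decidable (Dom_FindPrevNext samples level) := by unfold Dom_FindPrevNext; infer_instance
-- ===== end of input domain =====

-- B replaces A's flag-carrying state machine by a precomputed running-minimum table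
-- plus a direct per-index test (objective: alternative algorithmic formulation).

-- ===== PORT A =====
-- A's single enumerate loop with the belowLevel flag; `none` = the final RuntimeError.
def FindPrevNextA (samples : List Int) (level : Int) :
    Int → List Int → Bool → Option ((Int × Int) × (Int × Int))
  | _, [], _ => none
  | index, sample :: rest, belowLevel =>
      if belowLevel then
        if sample ≥ level then
          match PySem.List.pyGet? samples (index - 1), PySem.List.pyGet? samples index with
          | some p, some c => some ((index - 1, p), (index, c))
          | _, _ => none
        else FindPrevNextA samples level (index + 1) rest belowLevel
      else
        if sample ≤ level then FindPrevNextA samples level (index + 1) rest true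
        else FindPrevNextA samples level (index + 1) rest belowLevel

def FindPrevNext (samples : List Int) (level : Int) : (Int × Int) × (Int × Int) :=
  (FindPrevNextA samples level 0 samples false).getD ((0, 0), (0, 0))

-- ===== PORT B =====
-- B's first loop: mins.append(s if not mins else min(mins[-1], s));
-- `pyGet? acc (-1)` is `mins[-1]`, `none` exactly when `not mins`.
def pvMinsLoop (acc : List Int) : List Int → List Int
  | [] => acc
  | s :: rest =>
      pvMinsLoop (acc ++ [match PySem.List.pyGet? acc (-1) with
                          | none => s
                          | some m => min m s]) rest

-- B's second loop over range(1, len(samples)); `none` = RuntimeError.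
def pvScanLoop (samples mins : List Int) (level : Int) :
    List Int → Option ((Int × Int) × (Int × Int))
  | [] => none
  | j :: js =>
      match PySem.List.pyGet? samples j, PySem.List.pyGet? mins (j - 1) with
      | some sj, some mj =>
          if sj ≥ level ∧ mj ≤ level then
            match PySem.List.pyGet? samples (j - 1) with
            | some sp => some ((j - 1, sp), (j, sj))
            | none => none
          else pvScanLoop samples mins level js
      | _, _ => none

def FindPrevNext_alt (samples : List Int) (level : Int) : (Int × Int) × (Int × Int) :=
  (pvScanLoop samples (pvMinsLoop [] samples) level
      (PySem.List.pyRange 1 (samples.length : Int) 1)).getD ((0, 0), (0, 0))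

-- ===== PRECONDITION & SPEC =====
-- Pre_ excludes exactly the inputs where the Python raises RuntimeError("No edge found"):
-- it holds iff some sample ≤ level is later followed by a sample ≥ level.
def Pre_FindPrevNext (samples : List Int) (level : Int) : Prop :=
  ∃ i < samples.length, ∃ j < samples.length, i < j ∧ samples[i]! ≤ level ∧ level ≤ samples[j]!
instance (samples : List Int) (level : Int) : Decidable (Pre_FindPrevNext samples level) := by
  unfold Pre_FindPrevNext; infer_instance

def pvWitness_FindPrevNext : List Int × Int := ([3, 1, 5], 2)

def Spec_FindPrevNext (samples : List Int) (level : Int) (out : (Int × Int) × (Int × Int)) : Prop :=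
  out = FindPrevNext_alt samples level
instance (samples : List Int) (level : Int) (out : (Int × Int) × (Int × Int)) :
    Decidable (Spec_FindPrevNext samples level out) := by unfold Spec_FindPrevNext; infer_instance

-- ===== CLAIM =====
def Claim_equal_FindPrevNext : Prop := ∀ (samples : List Int) (level : Int), Dom_FindPrevNext samples level → Pre_FindPrevNext samples level → Spec_FindPrevNext samples level (FindPrevNext samples level)

-- ===== LEMMAS AND PROOFS =====

-- Common reference loop: j = current index, m = min of samples[0:j], prev = samples[j-1].
def edgeC (level : Int) : Int → Int → Int → List Int → Option ((Int × Int) × (Int × Int))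
  | _, _, _, [] => none
  | j, m, prev, cur :: rest =>
      if cur ≥ level ∧ m ≤ level then some ((j - 1, prev), (j, cur))
      else edgeC level (j + 1) (min m cur) cur rest

-- Prefix minima continuing from a current minimum m.
def pmAux (m : Int) : List Int → List Int
  | [] => []
  | s :: r => min m s :: pmAux (min m s) r

theorem pyGet?_neg_one (acc : List Int) : PySem.List.pyGet? acc (-1) = acc.getLast? := by
  simp only [PySem.List.pyGet?, PySem.List.pyIdx?]
  cases acc with
  | nil => simp
  | cons a l => simp [List.getLast?_eq_getElem?]

theorem pvMinsLoop_eq (l : List Int) :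
    ∀ (acc : List Int) (m : Int), acc.getLast? = some m →
      pvMinsLoop acc l = acc ++ pmAux m l := by
  induction l with
  | nil => intro acc m h; simp [pvMinsLoop, pmAux]
  | cons s r ih =>
      intro acc m h
      rw [pvMinsLoop, pyGet?_neg_one, h]
      rw [ih (acc ++ [min m s]) (min m s) (by simp)]
      simp [pmAux]

theorem A_eq_C (samples : List Int) (level : Int) (tail : List Int) :
    ∀ (front : List Int) (prev m : Int), samples = front ++ prev :: tail →
      FindPrevNextA samples level ((front.length : Int) + 1) tail (decide (m ≤ level))
        = edgeC level ((front.length : Int) + 1) m prev tail := by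
  induction tail with
  | nil => intro front prev m h; simp [FindPrevNextA, edgeC]
  | cons cur rest ih =>
      intro front prev m h
      have e1 : PySem.List.pyGet? samples ((front.length : Int) + 1 - 1) = some prev := by
        rw [show (front.length : Int) + 1 - 1 = ((front.length : Nat) : Int) by ring,
            PySem.List.pyGet?_natCast, h, List.getElem?_append_right (le_refl _)]
        simp
      have e2 : PySem.List.pyGet? samples ((front.length : Int) + 1) = some cur := by
        rw [show (front.length : Int) + 1 = ((front.length + 1 : Nat) : Int) by push_cast; ring,
            PySem.List.pyGet?_natCast, h, List.getElem?_append_right (by omega)]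
        simp
      by_cases hm : m ≤ level
      · by_cases hc : cur ≥ level
        · have e1' : samples[front.length]? = some prev := by
            rw [h, List.getElem?_append_right (le_refl _)]; simp
          simp [FindPrevNextA, edgeC, hm, hc, e1', e2]
        · have hd : decide (min m cur ≤ level) = true := by simp; omega
          have := hd ▸ ih (front ++ [prev]) cur (min m cur) (by simpa using h)
          simp only [List.length_append, List.length_cons, List.length_nil] at this
          push_cast at this
          simp only [FindPrevNextA, edgeC, hm, hc, decide_true]
          simp only [false_and, if_false, if_true]
          simpa [add_assoc] using this
      · have hcond : ¬ (cur ≥ level ∧ m ≤ level) := by tauto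
        by_cases hc : cur ≤ level
        · have hd : decide (min m cur ≤ level) = true := by simp; omega
          have := hd ▸ ih (front ++ [prev]) cur (min m cur) (by simpa using h)
          simp only [List.length_append, List.length_cons, List.length_nil] at this
          push_cast at this
          simp only [FindPrevNextA, edgeC, hm, hc, decide_false, if_false, if_true,
            Bool.false_eq_true]
          simpa [add_assoc] using this
        · have hd : decide (min m cur ≤ level) = false := by simp; omega
          have := hd ▸ ih (front ++ [prev]) cur (min m cur) (by simpa using h)
          simp only [List.length_append, List.length_cons, List.length_nil] at this
          push_cast at this
          simp only [FindPrevNextA, edgeC, hm, hc, hcond, decide_false, if_false,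
            Bool.false_eq_true]
          simpa [add_assoc] using this

theorem scan_eq_C (samples : List Int) (level : Int) (tail : List Int) :
    ∀ (front minsF : List Int) (prev m : Int),
      samples = front ++ prev :: tail → minsF.length = front.length →
      pvScanLoop samples (minsF ++ m :: pmAux m tail) level
          (PySem.List.pyRange ((front.length : Int) + 1) (samples.length : Int) 1)
        = edgeC level ((front.length : Int) + 1) m prev tail := by
  induction tail with
  | nil =>
      intro front minsF prev m h hlen
      have hn : (samples.length : Int) = (front.length : Int) + 1 := by
        rw [h]; simp
      rw [hn]
      have hr : PySem.List.pyRange ((front.length : Int) + 1) ((front.length : Int) + 1) 1 = [] := by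
        simp [pysem]
      rw [hr]
      simp [pvScanLoop, edgeC]
  | cons cur rest ih =>
      intro front minsF prev m h hlen
      have hlt : (front.length : Int) + 1 < (samples.length : Int) := by
        rw [h]; simp
      rw [PySem.List.pyRange_one_cons hlt]
      have e2 : PySem.List.pyGet? samples ((front.length : Int) + 1) = some cur := by
        rw [show (front.length : Int) + 1 = ((front.length + 1 : Nat) : Int) by push_cast; ring,
            PySem.List.pyGet?_natCast, h, List.getElem?_append_right (by omega)]
        simp
      have e3 : PySem.List.pyGet? (minsF ++ m :: pmAux m (cur :: rest)) ((front.length : Int) + 1 - 1)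
          = some m := by
        rw [show (front.length : Int) + 1 - 1 = ((front.length : Nat) : Int) by ring,
            PySem.List.pyGet?_natCast, List.getElem?_append_right (by omega)]
        simp [hlen]
      by_cases hcond : cur ≥ level ∧ m ≤ level
      · have e1' : samples[front.length]? = some prev := by
          rw [h, List.getElem?_append_right (le_refl _)]; simp
        have e3' : (minsF ++ m :: pmAux m (cur :: rest))[front.length]? = some m := by
          rw [List.getElem?_append_right (by omega)]; simp [hlen]
        simp [pvScanLoop, edgeC, e2, e1', e3', hcond]
      · have hrec := ih (front ++ [prev]) (minsF ++ [m]) cur (min m cur)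
          (by simpa using h) (by simp [hlen])
        simp only [List.length_append, List.length_cons, List.length_nil] at hrec
        push_cast at hrec
        rw [pvScanLoop]
        rw [e2, e3]
        simp only [hcond, if_false]
        rw [edgeC]
        simp only [hcond, if_false]
        have hmins : (minsF ++ [m]) ++ (min m cur) :: pmAux (min m cur) rest
            = minsF ++ m :: pmAux m (cur :: rest) := by simp [pmAux]
        rw [hmins] at hrec
        simpa [add_assoc] using hrec

-- ===== VERDICT =====
theorem FindPrevNext_spec : Claim_equal_FindPrevNext := by
  intro samples level _ _
  unfold Spec_FindPrevNext FindPrevNext FindPrevNext_alt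
  cases samples with
  | nil => rfl
  | cons s0 ss =>
      have hmins : pvMinsLoop [] (s0 :: ss) = s0 :: pmAux s0 ss := by
        rw [pvMinsLoop]
        have : PySem.List.pyGet? ([] : List Int) (-1) = none := rfl
        rw [this]
        simpa using pvMinsLoop_eq ss [s0] s0 (by simp)
      have hA : FindPrevNextA (s0 :: ss) level 0 (s0 :: ss) false = edgeC level 1 s0 s0 ss := by
        have hstep := A_eq_C (s0 :: ss) level ss [] s0 s0 rfl
        simp only [List.length_nil, Nat.cast_zero, zero_add] at hstep
        by_cases hs : s0 ≤ level
        · simpa [FindPrevNextA, hs] using hstep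
        · simpa [FindPrevNextA, hs] using hstep
      have hB := scan_eq_C (s0 :: ss) level ss [] [] s0 s0 rfl rfl
      simp only [List.length_nil, Nat.cast_zero, zero_add, List.nil_append] at hB
      rw [hA, hmins, hB]
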